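-- pv_equiv track=rewrite | github.com/alskaf1293/neuralcomputer | python_rtl/pc_network.py | layer_dims
-- ===== SOURCE A (Python) =====
-- def layer_dims(k_lut: list[int], m0: int = 0) -> list[tuple[int, int, int]]:
--     """Return (k, n, m) for each layer index (bottom-to-top)."""
--     nl = len(k_lut)
--     out = []
--     for ul in range(nl):
--         k = k_lut[ul]
--         n = k_lut[0] if nl == 1 else (k_lut[nl-2] if ul == nl-1 else k_lut[ul+1])
--         m = m0 if ul == 0 else k_lut[ul-1]
--         out.append((k, n, m))
--     return out
-- ===== SOURCE B (Python) =====
-- def layer_dims(k_lut: list[int], m0: int = 0) -> list[tuple[int, int, int]]: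
--     """Single pass over adjacent elements carrying the previous value; no index
--     arithmetic: each step emits (cur, next, prev), and the final layer's n is
--     its previous element (its own value for a one-layer net)."""
--     if not k_lut:
--         return []
--     if len(k_lut) == 1:
--         k = k_lut[0]
--         return [(k, k, m0)]
--     out = []
--     prev = m0
--     cur = k_lut[0]
--     for nxt in k_lut[1:]:
--         out.append((cur, nxt, prev))
--         prev, cur = cur, nxt
--     out.append((cur, prev, prev))
--     return out
-- ===== Notes on version B (the rewrite author's own statement) =====
-- stated objective: alternative
-- what changed: B replaces A's index loop (which selects k, n, m via index arithmetic k_lut[ul+1], k_lut[nl-2], k_lut[ul-1] at each position) with a single adjacent-pair walk over the list itself carrying the previous element as state, emitting (cur, next, prev) per step and closing with (cur, prev, prev) since the last layer's n equals its previous element; no per-element indexing or conditionals.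
import Mathlib
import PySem

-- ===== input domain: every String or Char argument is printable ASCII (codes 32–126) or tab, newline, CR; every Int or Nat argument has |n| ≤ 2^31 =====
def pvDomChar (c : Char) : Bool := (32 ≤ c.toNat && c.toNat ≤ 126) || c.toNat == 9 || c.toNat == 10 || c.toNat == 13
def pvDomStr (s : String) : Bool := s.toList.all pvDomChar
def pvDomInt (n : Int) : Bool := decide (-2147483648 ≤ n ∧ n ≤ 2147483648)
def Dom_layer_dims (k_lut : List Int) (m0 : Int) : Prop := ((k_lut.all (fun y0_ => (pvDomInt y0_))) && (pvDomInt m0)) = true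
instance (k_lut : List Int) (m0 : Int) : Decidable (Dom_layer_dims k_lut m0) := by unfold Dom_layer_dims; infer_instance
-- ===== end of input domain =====

-- B replaces A's index loop with a single adjacent-pair walk carrying the previous element
-- (no index arithmetic); objective: alternative decomposition (same cost).


-- ===== PORT A =====
-- one loop over range(nl), appending one (k, n, m) triple per index
-- (indices ul, ul±1, nl-2 are always in range in Python, so pyGetD's default 0 is never consulted)
def layer_dims (k_lut : List Int) (m0 : Int) : List (Int × Int × Int) :=
  let nl : Int := k_lut.length
  (PySem.List.pyRange 0 nl 1).foldl (fun out ul =>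
    let k := PySem.List.pyGetD k_lut ul 0
    let n := if nl = 1 then PySem.List.pyGetD k_lut 0 0
             else if ul = nl - 1 then PySem.List.pyGetD k_lut (nl - 2) 0
             else PySem.List.pyGetD k_lut (ul + 1) 0
    let m := if ul = 0 then m0 else PySem.List.pyGetD k_lut (ul - 1) 0
    out ++ [(k, n, m)]) []

-- ===== PORT B =====
-- fold over the tail with state (prev, cur, out); one final append for the last layer
def layer_dims_alt (k_lut : List Int) (m0 : Int) : List (Int × Int × Int) :=
  match k_lut with
  | [] => []
  | [k] => [(k, k, m0)]
  | k :: rest =>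
    let s := rest.foldl (fun (st : Int × Int × List (Int × Int × Int)) nxt =>
      (st.2.1, nxt, st.2.2 ++ [(st.2.1, nxt, st.1)])) (m0, k, [])
    s.2.2 ++ [(s.2.1, s.1, s.1)]

-- ===== PRECONDITION & SPEC =====
def Spec_layer_dims (k_lut : List Int) (m0 : Int) (out : List (Int × Int × Int)) : Prop := out = layer_dims_alt k_lut m0
instance (k_lut : List Int) (m0 : Int) (out : List (Int × Int × Int)) : Decidable (Spec_layer_dims k_lut m0 out) := by unfold Spec_layer_dims; infer_instance

-- ===== CLAIM (what is proved, stated in full; the proofs are below) =====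
def Claim_equal_layer_dims : Prop := ∀ (k_lut : List Int) (m0 : Int), Dom_layer_dims k_lut m0 → Spec_layer_dims k_lut m0 (layer_dims k_lut m0)

-- ===== LEMMAS AND PROOFS =====

-- proof-side recursive model of B's prev-carrying walk
def layer_dims_go (prev cur : Int) : List Int → List (Int × Int × Int)
  | [] => [(cur, prev, prev)]
  | x :: rest => (cur, x, prev) :: layer_dims_go cur x rest

-- B's fold accumulates exactly the recursive walk
theorem layer_dims_fold_eq (rest : List Int) (prev cur : Int) (out : List (Int × Int × Int)) :
    (let s := rest.foldl (fun (st : Int × Int × List (Int × Int × Int)) nxt =>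
        (st.2.1, nxt, st.2.2 ++ [(st.2.1, nxt, st.1)])) (prev, cur, out)
     s.2.2 ++ [(s.2.1, s.1, s.1)]) = out ++ layer_dims_go prev cur rest := by
  induction rest generalizing prev cur out with
  | nil => simp [layer_dims_go]
  | cons x rs ih =>
    simp only [List.foldl_cons]
    exact (ih cur x (out ++ [(cur, x, prev)])).trans (by simp [layer_dims_go])

-- closed-form characterisation of the recursive walk as a map over indices of the full list cur :: rest
theorem layer_dims_go_eq (prev cur : Int) (rest : List Int) :
    layer_dims_go prev cur rest = (List.range (rest.length + 1)).map (fun i =>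
      (((cur :: rest).getD i 0,
        if i = rest.length then (if rest.length = 0 then prev else (cur :: rest).getD (i-1) 0)
        else (cur :: rest).getD (i+1) 0,
        if i = 0 then prev else (cur :: rest).getD (i-1) 0) : Int × Int × Int)) := by
  induction rest generalizing prev cur with
  | nil => simp [layer_dims_go]
  | cons x rs ih =>
    show (cur, x, prev) :: layer_dims_go cur x rs = _
    rw [show (x :: rs).length + 1 = (rs.length + 1) + 1 by simp]
    rw [List.range_succ_eq_map, List.map_cons]
    congr 1
    case e_tail =>
      rw [ih cur x, List.map_map]
      apply List.map_congr_left
      intro i hi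
      simp only [List.mem_range] at hi
      by_cases hlast : i = rs.length
      · subst hlast
        rcases rs with _ | ⟨y, ys⟩
        · simp [List.getD]
        · simp only [List.getD, List.length_cons]
          simp
          rfl
      · rcases i with _ | j
        · rcases rs with _ | ⟨y, ys⟩
          · exact absurd rfl hlast
          · simp [List.getD]
        · simp [List.getD, hlast]

theorem layer_dims_main (k_lut : List Int) (m0 : Int) :
    layer_dims k_lut m0 = layer_dims_alt k_lut m0 := by
  match k_lut with
  | [] => rfl
  | [a] =>
    simp [layer_dims, layer_dims_alt, PySem.List.pyRange_one, PySem.List.pyGetD,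
      PySem.List.pyGet?, PySem.List.pyIdx?]
  | a :: b :: rs =>
    set ks := a :: b :: rs with hks
    have hA : layer_dims ks m0 = (List.range ks.length).map (fun i : Nat =>
        ((PySem.List.pyGetD ks (i : Int) 0,
          if (ks.length : Int) = 1 then PySem.List.pyGetD ks 0 0
          else if (i : Int) = (ks.length : Int) - 1 then PySem.List.pyGetD ks ((ks.length : Int) - 2) 0
          else PySem.List.pyGetD ks ((i : Int) + 1) 0,
          if (i : Int) = 0 then m0 else PySem.List.pyGetD ks ((i : Int) - 1) 0) : Int × Int × Int)) := by
      rw [layer_dims]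
      rw [PySem.List.foldl_append_singleton_eq_map]
      rw [PySem.List.pyRange_one, List.map_map]
      simp only [Function.comp_def, zero_add, Int.sub_zero, Int.toNat_natCast, List.nil_append]
    rw [hA]
    have hB : layer_dims_alt ks m0 = layer_dims_go m0 a (b :: rs) := by
      show (let s := (b :: rs).foldl _ (m0, a, []); s.2.2 ++ [(s.2.1, s.1, s.1)]) = _
      rw [layer_dims_fold_eq (b :: rs) m0 a []]
      simp
    rw [hB, layer_dims_go_eq]
    have hlen : ks.length = rs.length + 2 := by simp [hks]
    have hlen2 : (b :: rs).length + 1 = ks.length := by simp [hks]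
    rw [hlen2]
    apply List.map_congr_left
    intro i hi
    simp only [List.mem_range] at hi
    have hiks : i < ks.length := hi
    have hcast : ∀ (j : Nat), PySem.List.pyGetD ks ((j : Nat) : Int) 0 = ks.getD j 0 := fun j =>
      PySem.List.pyGetD_natCast ks j 0
    refine Prod.ext ?_ (Prod.ext ?_ ?_)
    · exact hcast i
    · rw [if_neg (by omega : ¬ (ks.length : Int) = 1)]
      simp only [List.length_cons]
      by_cases hlast : i = rs.length + 1
      · rw [if_pos (by omega : (i : Int) = (ks.length : Int) - 1), if_pos hlast]
        rw [if_neg (by omega : ¬ rs.length + 1 = 0)]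
        rw [show (ks.length : Int) - 2 = ((rs.length : Nat) : Int) by omega, hcast]
        have : i - 1 = rs.length := by omega
        rw [this]
      · rw [if_neg (by omega : ¬ (i : Int) = (ks.length : Int) - 1), if_neg hlast]
        rw [show ((i : Int) + 1) = (((i + 1 : Nat)) : Int) by omega, hcast]
    · by_cases h0 : i = 0
      · subst h0; simp
      · rw [if_neg (by omega : ¬ ((i : Int)) = 0), if_neg h0]
        rw [show ((i : Int) - 1) = (((i - 1 : Nat)) : Int) by omega]
        simp [hks]

-- ===== VERDICT (by name: the statement is the Claim_ definition above) =====
theorem layer_dims_spec : Claim_equal_layer_dims := by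
  intro k_lut m0 _
  unfold Spec_layer_dims
  exact layer_dims_main k_lut m0
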